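-- pv_equiv track=rewrite | github.com/Jamie-Rodriguez/google-foobar | prepare-the-bunnies-escape/solution.py | bfs
-- ===== SOURCE A (Python) =====
-- from collections import deque
--
-- def neighbors(map, coord):
--     # type: (List[List[int]], Tuple[int, int]) -> List[Tuple[int, int]]
--     adjacent = []
--
--     # The problem definition in Read-Me states:
--     # "The height and width of the map can be from 2 to 20."
--     if coord[0] > 0:
--         adjacent.append((coord[0] - 1, coord[1]))
--     if coord[0] < len(map) - 1:
--         adjacent.append((coord[0] + 1, coord[1]))
--     if coord[1] > 0:
--         adjacent.append((coord[0], coord[1] - 1))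
--     if coord[1] < len(map[coord[0]]) - 1:
--         adjacent.append((coord[0], coord[1] + 1))
--
--     return adjacent
--
-- def bfs(map, num_walls):
--     # type: (List[List[int]], int) -> Optional[int]
--     # Assumes 'map' is n rows, where each and every row is *always*
--     # m = len(map[0]) columns
--     # i.e. a square matrix, and not a staggered array of arrays
--     # As per Read-Me problem description
--     num_rows = len(map)
--     # Not strictly necessary, but a little more safe
--     num_columns = len(map[num_rows - 1])
--     # Problem description in Read-Me:
--     # "The door out of the station is at the top left (0,0) and the door into
--     # an escape pod is at the bottom right (w-1,h-1)."
--     start = (0, 0)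
--     end = (num_rows - 1, num_columns - 1)
--
--     # The current, minimum number of walls we have gone through to reach
--     # arbitrary square: wall_count_last_visit[r][c].
--     # We initialise all squares to 'num_walls' so that the search will
--     # then prioritise going through *less* walls than this number,
--     # and conversely will never go through more walls than this number
--     wall_count_last_visit = [[num_walls for _ in range(num_columns)] for _ in range(num_rows)]
--     # Tuples of
--     #     (coordinate, number of walls we have gone through, number of steps taken so far)
--     queue = deque()
--     queue.appendleft((start, 0, 0))
--
--     while queue:
--         (current, current_wall_count, num_steps) = queue.pop()
--         (current_row, current_column) = current
--
--         if map[current_row][current_column] == 1: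
--             current_wall_count += 1
--
--         # If current_wall_count > num_walls, then we've gone through too many walls!
--         if current == end and current_wall_count <= num_walls:
--             return num_steps + 1
--
--         for (next_row, next_column) in neighbors(map, current):
--             # Did we find a new path that goes through less walls than our search so far?
--             if current_wall_count <= wall_count_last_visit[next_row][next_column]:
--                 wall_count_last_visit[next_row][next_column] = current_wall_count
--                 queue.appendleft(((next_row, next_column), current_wall_count, num_steps + 1))
--
--     # I made this case return None, but if we wanted to strictly adhere to the
--     # type signature
--     #     def solution(map): (List[List[int]]) -> int
--     # Then we could return -1 or 0 or something instead
--     # The problem definition already states that all mazes are solvable anyway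
--     # (see
--     #     > The map will always be solvable,
--     #     > though you may or may not need to remove a wall.
--     # ),
--     # so this case will not even be tested...
--     return None
-- ===== SOURCE B (Python) =====
-- def bfs(map, num_walls):
--     # type: (List[List[int]], int) -> Optional[int]
--     rows = len(map)
--     cols = len(map[rows - 1])
--
--     def wall(r, c):
--         return 1 if map[r][c] == 1 else 0
--
--     NONE = None
--     best = [[None] * cols for _ in range(rows)]
--     best[0][0] = wall(0, 0)
--     for d in range(rows * cols):
--         e = best[rows - 1][cols - 1]
--         if e is not None and e <= num_walls:
--             return d + 1
--         nxt = [[None] * cols for _ in range(rows)]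
--         for r in range(rows):
--             for c in range(cols):
--                 v = best[r][c]
--                 if v is None:
--                     continue
--                 for (nr, nc) in ((r - 1, c), (r + 1, c), (r, c - 1), (r, c + 1)):
--                     if 0 <= nr < rows and 0 <= nc < cols:
--                         w = v + wall(nr, nc)
--                         if nxt[nr][nc] is None or w < nxt[nr][nc]:
--                             nxt[nr][nc] = w
--         best = nxt
--     return None
-- ===== Notes on version B (the rewrite author's own statement) =====
-- stated objective: alternative
-- what changed: Replaced the deque search with <=-pruning re-enqueues (worst-case exponential, and non-terminating on unsolvable mazes) by a dynamic program over exact step counts: a rows x cols table of the minimal wall count reachable in exactly d steps, advanced for d = 0..rows*cols-1 and checked at the exit cell; B always terminates (intended as asymptotically faster, but a timing run could not confirm a ratio: A already times out at sizes where the clock can measure).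
-- outside the precondition, e.g. on bfs([[0, 0], [0, 0, 9]], 0): A returns 4, B raises IndexError; on bfs([[0, 1], [1, 0]], 0): A returns None, B returns None
import Mathlib
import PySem

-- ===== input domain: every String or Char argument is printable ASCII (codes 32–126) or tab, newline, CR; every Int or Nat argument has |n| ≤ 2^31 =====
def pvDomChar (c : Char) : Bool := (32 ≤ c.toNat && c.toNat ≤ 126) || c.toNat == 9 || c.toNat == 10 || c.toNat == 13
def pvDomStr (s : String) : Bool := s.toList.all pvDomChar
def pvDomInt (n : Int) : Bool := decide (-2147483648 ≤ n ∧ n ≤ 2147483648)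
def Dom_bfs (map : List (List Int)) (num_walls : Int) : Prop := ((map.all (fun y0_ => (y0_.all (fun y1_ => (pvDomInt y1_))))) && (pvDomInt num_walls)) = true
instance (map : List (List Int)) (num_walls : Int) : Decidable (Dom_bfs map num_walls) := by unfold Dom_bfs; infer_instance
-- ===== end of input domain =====

-- B replaces A's deque search with ≤-pruning re-enqueues (which can re-enqueue the same state
-- repeatedly and loops forever on unsolvable mazes) by an exact-step-count dynamic program that
-- always terminates; equivalence is proved on rectangular maps that are solvable within the
-- wall budget (or with num_walls < 0).
-- All list indices reached by either program on admitted inputs are nonnegative and in range,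
-- so indexing is ported with getD after toNat (exact there).

-- ===== PORT A =====
-- map[r][c] (indices are ≥ 0 and in range on every admitted input; exact there)
def cellA (map : List (List Int)) (r c : Int) : Int := (map.getD r.toNat []).getD c.toNat 0

def neighborsA (map : List (List Int)) (coord : Int × Int) : List (Int × Int) :=
  (if coord.1 > 0 then [(coord.1 - 1, coord.2)] else []) ++
  (if coord.1 < (map.length : Int) - 1 then [(coord.1 + 1, coord.2)] else []) ++
  (if coord.2 > 0 then [(coord.1, coord.2 - 1)] else []) ++
  (if coord.2 < ((map.getD coord.1.toNat []).length : Int) - 1 then [(coord.1, coord.2 + 1)] else [])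

def mGetA (M : List (List Int)) (r c : Int) : Int := (M.getD r.toNat []).getD c.toNat 0
def mSetA (M : List (List Int)) (r c : Int) (v : Int) : List (List Int) :=
  M.set r.toNat ((M.getD r.toNat []).set c.toNat v)

-- the while-loop; queue pops at the head, appendleft = append at the tail; fuel only cuts off
-- runs that Python never finishes (A loops forever on mazes with no valid path)
def bfsLoopA (map : List (List Int)) (W : Int) (numRows numCols : Int) :
    Nat → List ((Int × Int) × Int × Int) → List (List Int) → Option Int
  | 0, _, _ => none
  | _ + 1, [], _ => none
  | fuel + 1, (cur, cw0, s) :: rest, M =>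
      let cw := if cellA map cur.1 cur.2 = 1 then cw0 + 1 else cw0
      if cur = (numRows - 1, numCols - 1) ∧ cw ≤ W then some (s + 1)
      else
        let st := (neighborsA map cur).foldl
          (fun (acc : List ((Int × Int) × Int × Int) × List (List Int)) nb =>
            if cw ≤ mGetA acc.2 nb.1 nb.2 then
              (acc.1 ++ [(nb, cw, s + 1)], mSetA acc.2 nb.1 nb.2 cw)
            else acc) (rest, M)
        bfsLoopA map W numRows numCols fuel st.1 st.2

def bfs (map : List (List Int)) (num_walls : Int) : Option Int :=
  let numRows : Int := map.length
  let numCols : Int := ((map.getD (numRows - 1).toNat []).length : Int)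
  let M := List.replicate numRows.toNat (List.replicate numCols.toNat num_walls)
  bfsLoopA map num_walls numRows numCols (4 ^ (map.length * numCols.toNat + 2)) [((0, 0), 0, 0)] M

-- ===== PORT B =====
-- 1 if map[r][c] == 1 else 0
def wallB (map : List (List Int)) (r c : Int) : Int :=
  if (map.getD r.toNat []).getD c.toNat 0 = 1 then 1 else 0

def bGet (best : List (List (Option Int))) (r c : Int) : Option Int :=
  (best.getD r.toNat []).getD c.toNat none

def bSet (best : List (List (Option Int))) (r c : Int) (v : Option Int) : List (List (Option Int)) :=
  best.set r.toNat ((best.getD r.toNat []).set c.toNat v)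

-- 'if nxt[nr][nc] is None or w < nxt[nr][nc]: nxt[nr][nc] = w'
def bRelax (nxt : List (List (Option Int))) (r c : Int) (w : Int) : List (List (Option Int)) :=
  match bGet nxt r c with
  | none => bSet nxt r c (some w)
  | some v => if w < v then bSet nxt r c (some w) else nxt

-- one round of the DP: minimal walls over paths of exactly d+1 steps from those of exactly d steps
def stepB (map : List (List Int)) (rows cols : Int) (best : List (List (Option Int))) :
    List (List (Option Int)) :=
  (List.range rows.toNat).foldl (fun nxt (r : Nat) =>
    (List.range cols.toNat).foldl (fun nxt (c : Nat) =>
      match bGet best (r : Int) (c : Int) with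
      | none => nxt
      | some v =>
        [((r : Int) - 1, (c : Int)), ((r : Int) + 1, (c : Int)),
         ((r : Int), (c : Int) - 1), ((r : Int), (c : Int) + 1)].foldl (fun nxt nb =>
          if 0 ≤ nb.1 ∧ nb.1 < rows ∧ 0 ≤ nb.2 ∧ nb.2 < cols then
            bRelax nxt nb.1 nb.2 (v + wallB map nb.1 nb.2)
          else nxt) nxt) nxt)
    (List.replicate rows.toNat (List.replicate cols.toNat none))

-- 'for d in range(rows*cols): if best[end] is not None and best[end] <= num_walls: return d+1 …'
def altGo (map : List (List Int)) (W rows cols : Int) :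
    Nat → Int → List (List (Option Int)) → Option Int
  | 0, _, _ => none
  | k + 1, d, best =>
      match bGet best (rows - 1) (cols - 1) with
      | some e =>
          if e ≤ W then some (d + 1)
          else altGo map W rows cols k (d + 1) (stepB map rows cols best)
      | none => altGo map W rows cols k (d + 1) (stepB map rows cols best)

def bfs_alt (map : List (List Int)) (num_walls : Int) : Option Int :=
  let rows : Int := map.length
  let cols : Int := ((map.getD (rows - 1).toNat []).length : Int)
  let best0 := (List.replicate rows.toNat (List.replicate cols.toNat (none : Option Int)))
  let best0 := bSet best0 0 0 (some (wallB map 0 0))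
  altGo map num_walls rows cols (rows.toNat * cols.toNat) 0 best0

-- ===== PRECONDITION & SPEC =====
-- value iteration used only to STATE solvability decidably: minimal wall count needed to reach
-- each cell (INF = rows*cols+1 meaning unreachable), relaxed rows*cols-1 times
def escINF (R C : Nat) : Int := ((R * C : Nat) : Int) + 1

def escWall (map : List (List Int)) (r c : Nat) : Int :=
  if (map.getD r []).getD c 0 = 1 then 1 else 0

def escGet (R C : Nat) (m : List (List Int)) (r c : Int) : Int :=
  if 0 ≤ r ∧ r < (R : Int) ∧ 0 ≤ c ∧ c < (C : Int) then
    (m.getD r.toNat []).getD c.toNat (escINF R C)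
  else escINF R C

def escRelax (map : List (List Int)) (R C : Nat) (m : List (List Int)) : List (List Int) :=
  (List.range R).map (fun r => (List.range C).map (fun c =>
    min ((m.getD r []).getD c (escINF R C))
      (min (min (escGet R C m ((r : Int) - 1) (c : Int)) (escGet R C m ((r : Int) + 1) (c : Int)))
           (min (escGet R C m (r : Int) ((c : Int) - 1)) (escGet R C m (r : Int) ((c : Int) + 1)))
        + escWall map r c)))

def escMat (map : List (List Int)) (R C : Nat) : Nat → List (List Int)
  | 0 => (List.range R).map (fun r => (List.range C).map (fun c =>
      if r = 0 ∧ c = 0 then escWall map 0 0 else escINF R C))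
  | k + 1 => escRelax map R C (escMat map R C k)

def escapable (map : List (List Int)) (W : Int) : Prop :=
  let R := map.length
  let C := (map.headD []).length
  let v := ((escMat map R C (R * C - 1)).getD (R - 1) []).getD (C - 1) (escINF R C)
  v ≤ W ∧ v ≤ ((R * C : Nat) : Int)

-- Pre_ excludes: the empty map and non-rectangular maps, on which A raises IndexError (on a few
-- ragged maps A happens to return before hitting the bad index — see the cite); and maps with no
-- start→end path of wall count ≤ num_walls (with num_walls ≥ 0), on which A never reaches the
-- exit: there A loops forever on some mazes and returns None on others, depending on the maze.
def Pre_bfs (map : List (List Int)) (num_walls : Int) : Prop :=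
  map ≠ [] ∧ 0 < (map.headD []).length ∧
  (∀ row ∈ map, row.length = (map.headD []).length) ∧
  (num_walls < 0 ∨ escapable map num_walls)

instance (map : List (List Int)) (num_walls : Int) : Decidable (Pre_bfs map num_walls) := by
  unfold Pre_bfs; unfold escapable; infer_instance

def pvWitness_bfs : List (List Int) × Int := ([[0, 0], [1, 0]], 0)

def Spec_bfs (map : List (List Int)) (num_walls : Int) (out : Option Int) : Prop := out = bfs_alt map num_walls
instance (map : List (List Int)) (num_walls : Int) (out : Option Int) : Decidable (Spec_bfs map num_walls out) := by unfold Spec_bfs; infer_instance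

-- ===== CLAIM (what is proved, stated in full; the proofs are below) =====
def Claim_equal_bfs : Prop := ∀ (map : List (List Int)) (num_walls : Int), Dom_bfs map num_walls → Pre_bfs map num_walls → Spec_bfs map num_walls (bfs map num_walls)

-- ===== LEMMAS AND PROOFS =====

-- ---------- the mathematical model: paths through the maze ----------

def gridR (map : List (List Int)) : Nat := map.length
def gridC (map : List (List Int)) : Nat := (map.headD []).length
def endC (map : List (List Int)) : Int × Int := ((gridR map : Int) - 1, (gridC map : Int) - 1)

def RectM (map : List (List Int)) : Prop :=
  map ≠ [] ∧ 0 < gridC map ∧ ∀ row ∈ map, row.length = gridC map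

def wallAt (map : List (List Int)) (p : Int × Int) : Int :=
  if (map.getD p.1.toNat []).getD p.2.toNat 0 = 1 then 1 else 0

def InR (map : List (List Int)) (p : Int × Int) : Prop :=
  0 ≤ p.1 ∧ p.1 < (gridR map : Int) ∧ 0 ≤ p.2 ∧ p.2 < (gridC map : Int)

def AdjM (map : List (List Int)) (p q : Int × Int) : Prop :=
  InR map p ∧ InR map q ∧
    ((q.1 = p.1 ∧ (q.2 = p.2 + 1 ∨ q.2 = p.2 - 1)) ∨
     (q.2 = p.2 ∧ (q.1 = p.1 + 1 ∨ q.1 = p.1 - 1)))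

-- walls are counted per visited cell, start and current cell included
inductive Reach0 (map : List (List Int)) : Nat → Int × Int → Int → Prop
  | base : InR map (0, 0) → Reach0 map 0 (0, 0) (wallAt map (0, 0))
  | step {d p w q} : Reach0 map d p w → AdjM map p q → Reach0 map (d + 1) q (w + wallAt map q)

-- "the exit is reachable in exactly d steps with total wall count ≤ num_walls"
def Sdw (map : List (List Int)) (W : Int) (d : Nat) : Prop :=
  ∃ w, Reach0 map d (endC map) w ∧ w ≤ W

lemma wall_nonneg (map : List (List Int)) (p : Int × Int) : 0 ≤ wallAt map p := by
  unfold wallAt; split <;> norm_num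

lemma reach_nonneg {map d p w} (h : Reach0 map d p w) : 0 ≤ w := by
  induction h with
  | base _ => exact wall_nonneg _ _
  | @step d p w q _ _ ih => have := wall_nonneg map q; omega

lemma reach_inr {map d p w} (h : Reach0 map d p w) : InR map p := by
  cases h with
  | base h => exact h
  | step _ hadj => exact hadj.2.1

lemma reach_zero_inv {map p w} (h : Reach0 map 0 p w) :
    p = (0, 0) ∧ w = wallAt map (0, 0) := by
  cases h with
  | base _ => exact ⟨rfl, rfl⟩

lemma reach_succ_inv {map d p w} (h : Reach0 map (d + 1) p w) :
    ∃ p' w', Reach0 map d p' w' ∧ AdjM map p' p ∧ w = w' + wallAt map p := by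
  cases h with
  | step hr hadj => exact ⟨_, _, hr, hadj, rfl⟩

-- ---------- generic 2-dimensional getD/set lemmas ----------

def Shape2 {α : Type} (M : List (List α)) (R C : Nat) : Prop :=
  M.length = R ∧ ∀ row ∈ M, row.length = C

def get2 {α : Type} (M : List (List α)) (d : α) (p : Int × Int) : α :=
  (M.getD p.1.toNat []).getD p.2.toNat d

def set2 {α : Type} (M : List (List α)) (p : Int × Int) (v : α) : List (List α) :=
  M.set p.1.toNat ((M.getD p.1.toNat []).set p.2.toNat v)

def InRn (R C : Nat) (p : Int × Int) : Prop :=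
  0 ≤ p.1 ∧ p.1 < (R : Int) ∧ 0 ≤ p.2 ∧ p.2 < (C : Int)

lemma getD_set_self' {α : Type} (l : List α) (i : Nat) (h : i < l.length) (a d : α) :
    (l.set i a).getD i d = a := by
  rw [List.getD_eq_getElem?_getD, List.getElem?_set_self h]; rfl

lemma getD_set_ne' {α : Type} (l : List α) (i j : Nat) (hne : j ≠ i) (a d : α) :
    (l.set i a).getD j d = l.getD j d := by
  rw [List.getD_eq_getElem?_getD, List.getElem?_set_ne (Ne.symm hne),
    ← List.getD_eq_getElem?_getD]

lemma getD_row {α : Type} {M : List (List α)} {R C : Nat} {i : Nat}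
    (h : Shape2 M R C) (hi : i < R) :
    M.getD i [] ∈ M ∧ (M.getD i []).length = C := by
  have hlen : i < M.length := by have := h.1; omega
  have : M.getD i [] = M[i] := by
    rw [List.getD_eq_getElem?_getD, List.getElem?_eq_getElem hlen]; rfl
  rw [this]
  exact ⟨List.getElem_mem _, h.2 _ (List.getElem_mem _)⟩

lemma shape2_set2 {α : Type} {M : List (List α)} {R C : Nat} {p v}
    (h : Shape2 M R C) (hp : InRn R C p) : Shape2 (set2 M p v) R C := by
  obtain ⟨h1, h2⟩ := h
  refine ⟨by simp [set2, h1], ?_⟩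
  intro row hrow
  rcases List.mem_or_eq_of_mem_set hrow with h' | h'
  · exact h2 _ h'
  · subst h'
    rw [List.length_set]
    exact (getD_row ⟨h1, h2⟩ (by obtain ⟨_,h,_,_⟩ := hp; omega)).2

lemma get2_set2_self {α : Type} {M : List (List α)} {R C : Nat} {p v} (d : α)
    (h : Shape2 M R C) (hp : InRn R C p) : get2 (set2 M p v) d p = v := by
  obtain ⟨hp1, hp2, hp3, hp4⟩ := hp
  have hr : p.1.toNat < M.length := by have := h.1; omega
  have hc : p.2.toNat < (M.getD p.1.toNat []).length := by
    rw [(getD_row h (by have := h.1; omega)).2]; omega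
  unfold get2 set2
  rw [getD_set_self' _ _ hr, getD_set_self' _ _ hc]

lemma get2_set2_ne {α : Type} {M : List (List α)} {R C : Nat} {p p' v} (d : α)
    (h : Shape2 M R C) (hp : InRn R C p) (hp' : InRn R C p') (hne : p' ≠ p) :
    get2 (set2 M p v) d p' = get2 M d p' := by
  obtain ⟨a1, a2, a3, a4⟩ := hp
  obtain ⟨b1, b2, b3, b4⟩ := hp'
  unfold get2 set2
  have hr : p.1.toNat < M.length := by have := h.1; omega
  by_cases hrow : p'.1.toNat = p.1.toNat
  · have hpne : p'.2.toNat ≠ p.2.toNat := by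
      intro hc; apply hne
      exact Prod.ext (by omega) (by omega)
    rw [hrow, getD_set_self' _ _ hr, getD_set_ne' _ _ _ hpne]
  · rw [getD_set_ne' _ _ _ hrow]

lemma get2_replicate {α : Type} {R C : Nat} {p} (d v : α)
    (hp : InRn R C p) : get2 (List.replicate R (List.replicate C v)) d p = v := by
  obtain ⟨a1, a2, a3, a4⟩ := hp
  unfold get2
  rw [show (List.replicate R (List.replicate C v)).getD p.1.toNat [] = List.replicate C v from by
    rw [List.getD_eq_getElem?_getD, List.getElem?_replicate_of_lt (by omega)]; rfl]
  rw [List.getD_eq_getElem?_getD, List.getElem?_replicate_of_lt (by omega)]; rfl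

lemma shape2_replicate {α : Type} (R C : Nat) (v : α) :
    Shape2 (List.replicate R (List.replicate C v)) R C := by
  refine ⟨by simp, ?_⟩
  intro row hrow
  rw [List.eq_of_mem_replicate hrow]; simp

lemma inr_iff_inrn {map : List (List Int)} {p} :
    InR map p ↔ InRn (gridR map) (gridC map) p := Iff.rfl

-- ---------- neighborsA characterization ----------

lemma mem_ite_single {α : Type} {c : Prop} [Decidable c] {a x : α} :
    x ∈ (if c then [a] else []) ↔ c ∧ x = a := by
  split <;> simp_all

lemma mGetA_eq (M : List (List Int)) (r c : Int) : mGetA M r c = get2 M 0 (r, c) := rfl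
lemma mSetA_eq (M : List (List Int)) (r c : Int) (v : Int) :
    mSetA M r c v = set2 M (r, c) v := rfl
lemma bGet_eq (best : List (List (Option Int))) (r c : Int) :
    bGet best r c = get2 best none (r, c) := rfl
lemma bSet_eq (best : List (List (Option Int))) (r c : Int) (v : Option Int) :
    bSet best r c v = set2 best (r, c) v := rfl
lemma wallB_eq (map : List (List Int)) (r c : Int) : wallB map r c = wallAt map (r, c) := rfl

lemma rect_shape {map : List (List Int)} (hrect : RectM map) :
    Shape2 map (gridR map) (gridC map) := ⟨rfl, hrect.2.2⟩

lemma mem_neighborsA {map : List (List Int)} {p nb : Int × Int}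
    (hrect : RectM map) (hp : InR map p) :
    nb ∈ neighborsA map p ↔ AdjM map p nb := by
  obtain ⟨h1, h2, h3, h4⟩ := hp
  have hlen : (map.getD p.1.toNat []).length = gridC map :=
    (getD_row (rect_shape hrect) (by omega)).2
  unfold neighborsA AdjM InR gridR at *
  simp only [List.mem_append, mem_ite_single, hlen, Prod.ext_iff]
  constructor
  · rintro (((⟨hc, e1, e2⟩ | ⟨hc, e1, e2⟩) | ⟨hc, e1, e2⟩) | ⟨hc, e1, e2⟩) <;>
      refine ⟨⟨h1, h2, h3, h4⟩, ⟨?_, ?_, ?_, ?_⟩, ?_⟩ <;> omega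
  · rintro ⟨-, ⟨b1, b2, b3, b4⟩, (⟨e1, e2 | e2⟩ | ⟨e1, e2 | e2⟩)⟩ <;> omega

lemma length_neighborsA (map : List (List Int)) (p : Int × Int) :
    (neighborsA map p).length ≤ 4 := by
  unfold neighborsA; split_ifs <;> simp

-- ---------- the optimal path, as a function on indices ----------

def uWalls (map : List (List Int)) (x : Nat → Int × Int) (j : Nat) : Int :=
  ((List.range (j + 1)).map (fun i => wallAt map (x i))).sum

lemma uWalls_succ (map : List (List Int)) (x : Nat → Int × Int) (j : Nat) :
    uWalls map x (j + 1) = uWalls map x j + wallAt map (x (j + 1)) := by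
  unfold uWalls; rw [List.range_succ]; simp

lemma uWalls_mono (map : List (List Int)) (x : Nat → Int × Int) {i j : Nat} (h : i ≤ j) :
    uWalls map x i ≤ uWalls map x j := by
  induction j with
  | zero => simp_all
  | succ j ih =>
    rcases Nat.lt_or_ge i (j+1) with h' | h'
    · have := uWalls_succ map x j
      have := wall_nonneg map (x (j+1))
      have := ih (by omega); omega
    · have : i = j + 1 := by omega
      simp [this]

lemma uWalls_congr {map : List (List Int)} {x y : Nat → Int × Int} {j : Nat}
    (h : ∀ i ≤ j, x i = y i) : uWalls map x j = uWalls map y j := by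
  unfold uWalls
  congr 1
  apply List.map_congr_left
  intro i hi
  rw [h i (by simpa using Nat.lt_succ_iff.mp (List.mem_range.mp hi))]

-- a Reach0 derivation yields such a function
lemma reach_to_fun {map d c w} (h : Reach0 map d c w) :
    ∃ x : Nat → Int × Int, x 0 = (0, 0) ∧ (∀ j < d, AdjM map (x j) (x (j + 1))) ∧
      x d = c ∧ uWalls map x d = w := by
  induction h with
  | base h =>
    exact ⟨fun _ => (0, 0), rfl, by omega, rfl, by simp [uWalls]⟩
  | @step d p w q hr hadj ih =>
    obtain ⟨x, hx0, hxadj, hxd, hxu⟩ := ih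
    refine ⟨fun j => if j ≤ d then x j else q, by simp [hx0], ?_, by simp, ?_⟩
    · intro j hj
      rcases Nat.lt_or_ge j d with h' | h'
      · simpa [show j ≤ d by omega, show j + 1 ≤ d by omega] using hxadj j h'
      · have hjd : j = d := by omega
        subst hjd
        simpa [hxd, show ¬(j + 1 ≤ j) by omega] using hadj
    · have h1 : uWalls map (fun j => if j ≤ d then x j else q) d = uWalls map x d :=
        uWalls_congr (fun i hi => by simp [hi])
      rw [uWalls_succ, h1, hxu]
      simp [show ¬(d + 1 ≤ d) by omega]

-- gluing: continue along the optimal path's suffix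
lemma reach_glue {map : List (List Int)} {x : Nat → Int × Int} {L : Nat}
    (hadj : ∀ j < L, AdjM map (x j) (x (j + 1))) {j t s : Nat} {v : Int}
    (hjt : j + t ≤ L) (h : Reach0 map s (x j) v) :
    Reach0 map (s + t) (x (j + t)) (v + (uWalls map x (j + t) - uWalls map x j)) := by
  induction t with
  | zero => simpa using h
  | succ t ih =>
    have hstep := Reach0.step (ih (by omega)) (hadj (j + t) (by omega))
    have heq : v + (uWalls map x (j + (t + 1)) - uWalls map x j) =
        v + (uWalls map x (j + t) - uWalls map x j) + wallAt map (x (j + t + 1)) := by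
      rw [show j + (t + 1) = (j + t) + 1 by omega, uWalls_succ]; ring
    rw [heq, show j + (t + 1) = (j + t) + 1 by omega, show s + (t + 1) = (s + t) + 1 by omega]
    exact hstep

-- ---------- A-side invariants ----------

def EntryOK (map : List (List Int)) (e : (Int × Int) × Int × Int) : Prop :=
  ∃ n : Nat, e.2.2 = (n : Int) ∧ Reach0 map n e.1 (e.2.1 + wallAt map e.1)

def QOK (map : List (List Int)) (k : Nat) (q : List ((Int × Int) × Int × Int)) : Prop :=
  (∃ q1 q2, q = q1 ++ q2 ∧ (∀ e ∈ q1, e.2.2 = (k : Int)) ∧ (∀ e ∈ q2, e.2.2 = (k : Int) + 1)) ∧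
  ∀ e ∈ q, EntryOK map e

def MOK (map : List (List Int)) (W : Int) (k : Nat)
    (q : List ((Int × Int) × Int × Int)) (M : List (List Int)) : Prop :=
  Shape2 M (gridR map) (gridC map) ∧
  ∀ p, InR map p → get2 M 0 p ≤ W ∧
    (get2 M 0 p = W ∨ (∃ e ∈ q, e.1 = p ∧ e.2.1 = get2 M 0 p) ∨
     (∃ n : Nat, n ≤ k ∧ Reach0 map n p (get2 M 0 p + wallAt map p)))

def OnTrack (map : List (List Int)) (x : Nat → Int × Int) (L : Nat)
    (q : List ((Int × Int) × Int × Int)) : Prop :=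
  ∃ j, j ≤ L ∧ ∃ e ∈ q, e.1 = x j ∧ e.2.1 + wallAt map (x j) ≤ uWalls map x j ∧
    e.2.2 = (j : Int)

def phiQ (L : Nat) (q : List ((Int × Int) × Int × Int)) : Nat :=
  (q.map (fun e => 4 ^ (L + 2 - (e.2.2).toNat) - 1)).sum

-- optimal-path package
structure OptPath (map : List (List Int)) (W : Int) (x : Nat → Int × Int) (L : Nat) : Prop where
  hx0 : x 0 = (0, 0)
  hadj : ∀ j < L, AdjM map (x j) (x (j + 1))
  hend : x L = endC map
  hW : uWalls map x L ≤ W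
  hmin : ∀ d, Sdw map W d → L ≤ d

-- anything that lands on the optimal path at most as many walls in cannot be faster
lemma opt_no_early {map W x L} (ho : OptPath map W x L) {j s : Nat} {v : Int}
    (hj : j ≤ L) (h : Reach0 map s (x j) v) (hv : v ≤ uWalls map x j) : j ≤ s := by
  have hg := reach_glue (x := x) ho.hadj (j := j) (t := L - j) (s := s)
      (by omega) h
  rw [show j + (L - j) = L by omega] at hg
  have hw : v + (uWalls map x L - uWalls map x j) ≤ W := by
    have := ho.hW; omega
  have := ho.hmin (s + (L - j)) ⟨_, ho.hend ▸ hg, hw⟩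
  omega

-- ---------- the main A-side lemma ----------

lemma phiQ_cons (L : Nat) (e : (Int × Int) × Int × Int) (q : List ((Int × Int) × Int × Int)) :
    phiQ L (e :: q) = (4 ^ (L + 2 - (e.2.2).toNat) - 1) + phiQ L q := by
  simp [phiQ]

lemma phiQ_append (L : Nat) (q q' : List ((Int × Int) × Int × Int)) :
    phiQ L (q ++ q') = phiQ L q + phiQ L q' := by
  simp [phiQ]

lemma term_le_phiQ {L : Nat} {e : (Int × Int) × Int × Int} {q : List ((Int × Int) × Int × Int)}
    (h : e ∈ q) : 4 ^ (L + 2 - (e.2.2).toNat) - 1 ≤ phiQ L q := by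
  unfold phiQ
  exact List.single_le_sum (by intro y _; omega) _ (List.mem_map_of_mem h)

lemma cw_eq (map : List (List Int)) (pc : Int × Int) (pw : Int) :
    (if cellA map pc.1 pc.2 = 1 then pw + 1 else pw) = pw + wallAt map pc := by
  unfold cellA wallAt
  split <;> omega

lemma MOK_mono {map : List (List Int)} {W : Int} {k k' : Nat} {q M}
    (hk : k ≤ k') (h : MOK map W k q M) : MOK map W k' q M := by
  refine ⟨h.1, ?_⟩
  intro p hp
  rcases h.2 p hp with ⟨h1, h2 | h2 | ⟨n, hn, h3⟩⟩
  · exact ⟨h1, Or.inl h2⟩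
  · exact ⟨h1, Or.inr (Or.inl h2)⟩
  · exact ⟨h1, Or.inr (Or.inr ⟨n, by omega, h3⟩)⟩

lemma OnTrack_sub {map : List (List Int)} {x : Nat → Int × Int} {L : Nat} {q q'}
    (hsub : ∀ e, e ∈ q → e ∈ q') (h : OnTrack map x L q) : OnTrack map x L q' := by
  obtain ⟨j, hj, e, he, h1, h2, h3⟩ := h
  exact ⟨j, hj, e, hsub e he, h1, h2, h3⟩

lemma qok_pop {map : List (List Int)} {k : Nat} {e rest}
    (h : QOK map k (e :: rest)) :
    ∃ k', k ≤ k' ∧ k' ≤ k + 1 ∧ e.2.2 = (k' : Int) ∧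
      (∀ f ∈ rest, f.2.2 = (k' : Int) ∨ f.2.2 = (k' : Int) + 1) ∧
      (∃ r1 r2, rest = r1 ++ r2 ∧ (∀ f ∈ r1, f.2.2 = (k' : Int)) ∧
        (∀ f ∈ r2, f.2.2 = (k' : Int) + 1)) ∧
      (∀ f ∈ e :: rest, EntryOK map f) := by
  obtain ⟨⟨q1, q2, happ, hq1, hq2⟩, hok⟩ := h
  cases q1 with
  | nil =>
    have hq2' : ∀ f ∈ e :: rest, f.2.2 = (k : Int) + 1 := by
      intro f hf
      apply hq2 f
      have : q2 = e :: rest := by simpa using happ.symm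
      rw [this]; exact hf
    refine ⟨k + 1, by omega, by omega, ?_, ?_, ⟨rest, [], by simp, ?_, by simp⟩, hok⟩
    · rw [hq2' e List.mem_cons_self]; push_cast; ring
    · intro f hf
      exact Or.inl (by rw [hq2' f (List.mem_cons_of_mem _ hf)]; push_cast; ring)
    · intro f hf
      rw [hq2' f (List.mem_cons_of_mem _ hf)]; push_cast; ring
  | cons e1 q1t =>
    have he : e1 = e ∧ q1t ++ q2 = rest := by
      have := happ
      simp only [List.cons_append] at this
      exact ⟨by injection this with h1 _; exact h1.symm, by injection this with _ h2; exact h2.symm⟩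
    obtain ⟨rfl, hrest⟩ := he
    refine ⟨k, le_refl _, by omega, hq1 _ List.mem_cons_self, ?_, ⟨q1t, q2, hrest.symm, ?_, hq2⟩, hok⟩
    · intro f hf
      rw [← hrest] at hf
      rcases List.mem_append.mp hf with h | h
      · exact Or.inl (hq1 _ (List.mem_cons_of_mem _ h))
      · exact Or.inr (hq2 _ h)
    · exact fun f hf => hq1 _ (List.mem_cons_of_mem _ hf)

-- the body of A's inner relaxation loop, named so the fold can be reasoned about
def AStep (cw s1 : Int) (acc : List ((Int × Int) × Int × Int) × List (List Int))
    (nb : Int × Int) : List ((Int × Int) × Int × Int) × List (List Int) :=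
  if cw ≤ mGetA acc.2 nb.1 nb.2 then
    (acc.1 ++ [(nb, cw, s1)], mSetA acc.2 nb.1 nb.2 cw)
  else acc

lemma A_fold {map : List (List Int)} {W : Int} {x : Nat → Int × Int} {L : Nat}
    (hrect : RectM map) (ho : OptPath map W x L) {k' : Nat} {pc : Int × Int} {cw : Int}
    {rest : List ((Int × Int) × Int × Int)}
    (hreach : Reach0 map k' pc cw)
    (hrest12 : ∀ f ∈ rest, f.2.2 = (k' : Int) ∨ f.2.2 = (k' : Int) + 1)
    (hrestok : ∀ f ∈ rest, EntryOK map f) :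
    ∀ (ns : List (Int × Int)) (news : List ((Int × Int) × Int × Int)) (M : List (List Int)),
      (∀ nb ∈ ns, AdjM map pc nb) →
      (∀ f ∈ news, f.2.2 = (k' : Int) + 1 ∧ f.2.1 = cw ∧ EntryOK map f) →
      MOK map W k' (rest ++ news) M →
      (OnTrack map x L (rest ++ news) ∨
        (∃ j, j < L ∧ pc = x j ∧ k' = j ∧ cw ≤ uWalls map x j ∧ x (j + 1) ∈ ns)) →
      ∃ news', (ns.foldl (AStep cw ((k' : Int) + 1)) (rest ++ news, M)).1 = rest ++ news' ∧
        news'.length ≤ news.length + ns.length ∧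
        (∀ f' ∈ news', f'.2.2 = (k' : Int) + 1 ∧ f'.2.1 = cw ∧ EntryOK map f') ∧
        MOK map W k' (rest ++ news')
          (ns.foldl (AStep cw ((k' : Int) + 1)) (rest ++ news, M)).2 ∧
        OnTrack map x L (rest ++ news') := by
  intro ns
  induction ns with
  | nil =>
    intro news M _ hnews hMOK hOT
    refine ⟨news, rfl, by simp, hnews, hMOK, ?_⟩
    rcases hOT with h | ⟨j, _, _, _, _, hmem⟩
    · exact h
    · exact absurd hmem (List.not_mem_nil)
  | cons nb nst ih =>
    intro news M hadj hnews hMOK hOT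
    have hAdjnb : AdjM map pc nb := hadj nb List.mem_cons_self
    have hInRnb : InR map nb := hAdjnb.2.1
    have hadj' : ∀ nb' ∈ nst, AdjM map pc nb' := fun nb' h => hadj nb' (List.mem_cons_of_mem _ h)
    rw [List.foldl_cons]
    by_cases hcond : cw ≤ mGetA M nb.1 nb.2
    · -- the neighbour is enqueued and the matrix updated
      have hstep : AStep cw ((k' : Int) + 1) (rest ++ news, M) nb =
          ((rest ++ news) ++ [(nb, cw, (k' : Int) + 1)], mSetA M nb.1 nb.2 cw) := by
        unfold AStep; rw [if_pos hcond]
      rw [hstep]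
      have hnewok : (nb, cw, (k' : Int) + 1).2.2 = (k' : Int) + 1 ∧
          (nb, cw, (k' : Int) + 1).2.1 = cw ∧ EntryOK map (nb, cw, (k' : Int) + 1) := by
        refine ⟨rfl, rfl, k' + 1, by push_cast; ring, ?_⟩
        exact Reach0.step hreach hAdjnb
      have hnews' : ∀ f ∈ news ++ [(nb, cw, (k' : Int) + 1)],
          f.2.2 = (k' : Int) + 1 ∧ f.2.1 = cw ∧ EntryOK map f := by
        intro f hf
        rcases List.mem_append.mp hf with h | h
        · exact hnews f h
        · rw [List.mem_singleton.mp h]; exact hnewok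
      have hMOK' : MOK map W k' (rest ++ (news ++ [(nb, cw, (k' : Int) + 1)]))
          (mSetA M nb.1 nb.2 cw) := by
        refine ⟨by rw [mSetA_eq]; exact shape2_set2 hMOK.1 (inr_iff_inrn.mp hInRnb), ?_⟩
        intro p hp
        by_cases hpe : p = nb
        · subst hpe
          rw [mSetA_eq, show (p.1, p.2) = p from rfl,
            get2_set2_self _ hMOK.1 (inr_iff_inrn.mp hp)]
          refine ⟨le_trans hcond (hMOK.2 p hp).1, Or.inr (Or.inl ?_)⟩
          exact ⟨(p, cw, (k' : Int) + 1), by simp, rfl, rfl⟩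
        · rw [mSetA_eq, show ((nb.1, nb.2) : Int × Int) = nb from rfl,
            get2_set2_ne _ hMOK.1 (inr_iff_inrn.mp hInRnb) (inr_iff_inrn.mp hp) hpe]
          rcases hMOK.2 p hp with ⟨h1, h2 | ⟨f, hf, hf1, hf2⟩ | h2⟩
          · exact ⟨h1, Or.inl h2⟩
          · refine ⟨h1, Or.inr (Or.inl ⟨f, ?_, hf1, hf2⟩)⟩
            rcases List.mem_append.mp hf with h | h
            · exact List.mem_append.mpr (Or.inl h)
            · exact List.mem_append.mpr (Or.inr (List.mem_append.mpr (Or.inl h)))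
          · exact ⟨h1, Or.inr (Or.inr h2)⟩
      have hOT' : OnTrack map x L (rest ++ (news ++ [(nb, cw, (k' : Int) + 1)])) ∨
          (∃ j, j < L ∧ pc = x j ∧ k' = j ∧ cw ≤ uWalls map x j ∧ x (j + 1) ∈ nst) := by
        rcases hOT with h | ⟨j, hjL, hpc, hk, hcwu, hmem⟩
        · exact Or.inl (OnTrack_sub (by
            intro e he
            rcases List.mem_append.mp he with h' | h'
            · exact List.mem_append.mpr (Or.inl h')
            · exact List.mem_append.mpr (Or.inr (List.mem_append.mpr (Or.inl h')))) h)
        · by_cases hnb : x (j + 1) = nb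
          · left
            refine ⟨j + 1, by omega, (nb, cw, (k' : Int) + 1), by simp, by simp [hnb], ?_, ?_⟩
            · show cw + wallAt map (x (j + 1)) ≤ uWalls map x (j + 1)
              rw [uWalls_succ]
              omega
            · show (k' : Int) + 1 = ((j + 1 : Nat) : Int)
              push_cast; omega
          · right
            refine ⟨j, hjL, hpc, hk, hcwu, ?_⟩
            rcases List.mem_cons.mp hmem with h | h
            · exact absurd h hnb
            · exact h
      have := ih (news ++ [(nb, cw, (k' : Int) + 1)]) (mSetA M nb.1 nb.2 cw) hadj' hnews'
        hMOK' hOT'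
      rw [← List.append_assoc] at this
      obtain ⟨news', ha, hb, hc, hd, he⟩ := this
      refine ⟨news', ha, by simp at hb ⊢; omega, hc, hd, he⟩
    · -- blocked: nothing changes, but the blocker proves the track survives
      have hstep : AStep cw ((k' : Int) + 1) (rest ++ news, M) nb = (rest ++ news, M) := by
        unfold AStep; rw [if_neg hcond]
      rw [hstep]
      have hOT' : OnTrack map x L (rest ++ news) ∨
          (∃ j, j < L ∧ pc = x j ∧ k' = j ∧ cw ≤ uWalls map x j ∧ x (j + 1) ∈ nst) := by
        rcases hOT with h | ⟨j, hjL, hpc, hk, hcwu, hmem⟩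
        · exact Or.inl h
        · by_cases hnb : x (j + 1) = nb
          · -- the blocking value comes from an entry already on the better track
            left
            have hlt : get2 M 0 nb < cw := by
              rw [mGetA_eq] at hcond
              have : get2 M 0 (nb.1, nb.2) = get2 M 0 nb := rfl
              omega
            have hujL : uWalls map x j ≤ uWalls map x L := uWalls_mono map x (by omega)
            have husucc := uWalls_succ map x j
            rcases (hMOK.2 nb hInRnb).2 with h1 | ⟨f, hf, hf1, hf2⟩ | ⟨n, hn, h3⟩
            · exfalso
              have := ho.hW
              omega
            · -- the queue entry that last set M[nb]
              obtain ⟨n, hn, hfr⟩ : EntryOK map f := by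
                rcases List.mem_append.mp hf with h' | h'
                · exact hrestok f h'
                · exact (hnews f h').2.2
              have hsteps : f.2.2 = (k' : Int) ∨ f.2.2 = (k' : Int) + 1 := by
                rcases List.mem_append.mp hf with h' | h'
                · exact hrest12 f h'
                · exact Or.inr (hnews f h').1
              have hval : f.2.1 + wallAt map (x (j + 1)) ≤ uWalls map x (j + 1) := by
                rw [husucc]
                omega
              have hfr' : Reach0 map n (x (j + 1)) (f.2.1 + wallAt map (x (j + 1))) := by
                rw [hf1, ← hnb] at hfr
                exact hfr
              have hge : j + 1 ≤ n := opt_no_early ho (by omega) hfr' hval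
              have hnval : n = j + 1 := by
                rcases hsteps with h' | h' <;> rw [hn] at h' <;> omega
              exact ⟨j + 1, by omega, f, hf, hf1.trans hnb.symm, hval, by rw [hn, hnval]⟩
            · exfalso
              have hval : get2 M 0 nb + wallAt map (x (j + 1)) ≤ uWalls map x (j + 1) := by
                rw [husucc]; omega
              have h3' : Reach0 map n (x (j + 1)) (get2 M 0 nb + wallAt map (x (j + 1))) := by
                rw [hnb]
                exact h3
              have hge : j + 1 ≤ n := opt_no_early ho (by omega) h3' hval
              omega
          · right
            refine ⟨j, hjL, hpc, hk, hcwu, ?_⟩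
            rcases List.mem_cons.mp hmem with h | h
            · exact absurd h hnb
            · exact h
      exact (fun ⟨news', ha, hb, hc, hd, he⟩ =>
        ⟨news', ha, by simp at hb ⊢; omega, hc, hd, he⟩)
        (ih news M hadj' hnews hMOK hOT')

lemma bfsLoopA_cons (map : List (List Int)) (W nr nc : Int) (fuel : Nat)
    (pc : Int × Int) (pw s : Int) (rest : List ((Int × Int) × Int × Int))
    (M : List (List Int)) :
    bfsLoopA map W nr nc (fuel + 1) ((pc, pw, s) :: rest) M =
      (if pc = (nr - 1, nc - 1) ∧ pw + wallAt map pc ≤ W then some (s + 1)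
       else bfsLoopA map W nr nc fuel
         ((neighborsA map pc).foldl (AStep (pw + wallAt map pc) (s + 1)) (rest, M)).1
         ((neighborsA map pc).foldl (AStep (pw + wallAt map pc) (s + 1)) (rest, M)).2) := by
  show (let cw := if cellA map pc.1 pc.2 = 1 then pw + 1 else pw;
    if pc = (nr - 1, nc - 1) ∧ cw ≤ W then some (s + 1)
    else
      let st := (neighborsA map pc).foldl
        (fun (acc : List ((Int × Int) × Int × Int) × List (List Int)) nb =>
          if cw ≤ mGetA acc.2 nb.1 nb.2 then
            (acc.1 ++ [(nb, cw, s + 1)], mSetA acc.2 nb.1 nb.2 cw)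
          else acc) (rest, M)
      bfsLoopA map W nr nc fuel st.1 st.2) = _
  rw [cw_eq]
  rfl

lemma A_main {map : List (List Int)} {W : Int} {x : Nat → Int × Int} {L : Nat}
    (hrect : RectM map) (ho : OptPath map W x L) :
    ∀ fuel (k : Nat) q M, QOK map k q → MOK map W k q M → OnTrack map x L q →
      phiQ L q ≤ fuel →
      bfsLoopA map W (gridR map : Int) (gridC map : Int) fuel q M = some ((L : Int) + 1) := by
  intro fuel
  induction fuel with
  | zero =>
    intro k q M hQ hM hT hphi
    exfalso
    obtain ⟨j, hj, e, he, -, -, he3⟩ := hT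
    have hterm := term_le_phiQ (L := L) he
    have htn : (e.2.2).toNat = j := by rw [he3]; simp
    rw [htn] at hterm
    have hpow : 4 ^ 2 ≤ 4 ^ (L + 2 - j) := Nat.pow_le_pow_right (by norm_num) (by omega)
    omega
  | succ fuel ih =>
    intro k q M hQ hM hT hphi
    rcases q with _ | ⟨e, rest⟩
    · obtain ⟨j, hj, e, he, -⟩ := hT
      exact absurd he List.not_mem_nil
    obtain ⟨pc, pw, ps⟩ := e
    obtain ⟨k', hkk, hkk1, hps, hrest12, ⟨r1, r2, hr12, hr1, hr2⟩, hallok⟩ := qok_pop hQ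
    have hps' : ps = (k' : Int) := hps
    subst hps'
    have hMOK' : MOK map W k' ((pc, pw, (k' : Int)) :: rest) M := MOK_mono hkk hM
    obtain ⟨n0, hn0, hreach0⟩ := hallok _ List.mem_cons_self
    have hn0e : n0 = k' := by
      have : (k' : Int) = (n0 : Int) := hn0
      omega
    subst hn0e
    have hreach : Reach0 map n0 pc (pw + wallAt map pc) := hreach0
    obtain ⟨j0, hj0, et, hetmem, het1, het2, het3⟩ := hT
    have hk'L : n0 ≤ L := by
      rcases List.mem_cons.mp hetmem with hhead | htail
      · rw [hhead] at het3
        have : (n0 : Int) = (j0 : Int) := het3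
        omega
      · rcases hrest12 et htail with h | h <;> rw [het3] at h <;> omega
    rw [bfsLoopA_cons]
    by_cases hret : pc = ((gridR map : Int) - 1, (gridC map : Int) - 1) ∧ pw + wallAt map pc ≤ W
    · rw [if_pos hret]
      have hS : Sdw map W n0 :=
        ⟨pw + wallAt map pc, by rw [← show pc = endC map from hret.1]; exact hreach, hret.2⟩
      have hLk : L ≤ n0 := ho.hmin n0 hS
      have hkL : n0 = L := by omega
      rw [hkL]
    · rw [if_neg hret]
      have hInRpc : InR map pc := reach_inr hreach
      have hOT0 : OnTrack map x L rest ∨ ∃ j, j < L ∧ pc = x j ∧ n0 = j ∧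
          (pw + wallAt map pc) ≤ uWalls map x j ∧ x (j + 1) ∈ neighborsA map pc := by
        rcases List.mem_cons.mp hetmem with hhead | htail
        · right
          have hj0k : j0 = n0 := by
            rw [hhead] at het3
            have : (n0 : Int) = (j0 : Int) := het3
            omega
          have hpcx : pc = x j0 := by rw [hhead] at het1; exact het1
          have hcwu : pw + wallAt map pc ≤ uWalls map x j0 := by
            rw [hhead] at het2
            rw [hpcx]
            exact het2
          have hjlt : j0 < L := by
            rcases Nat.lt_or_ge j0 L with h | h
            · exact h
            · exfalso
              have hj0L : j0 = L := by omega
              apply hret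
              constructor
              · rw [hpcx, hj0L, ho.hend]; rfl
              · have h1 : uWalls map x j0 ≤ uWalls map x L := uWalls_mono map x (by omega)
                have := ho.hW
                omega
          refine ⟨j0, hjlt, hpcx, by omega, hcwu, ?_⟩
          rw [mem_neighborsA hrect hInRpc]
          have := ho.hadj j0 hjlt
          rw [← hpcx] at this
          exact this
        · exact Or.inl ⟨j0, hj0, et, htail, het1, het2, het3⟩
      have hMOKrest : MOK map W n0 rest M := by
        refine ⟨hMOK'.1, ?_⟩
        intro p hp
        rcases hMOK'.2 p hp with ⟨h1, h2 | ⟨f, hf, hfp, hfv⟩ | h2⟩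
        · exact ⟨h1, Or.inl h2⟩
        · rcases List.mem_cons.mp hf with hfh | hft
          · refine ⟨h1, Or.inr (Or.inr ⟨n0, le_refl _, ?_⟩)⟩
            have hppc : pc = p := by rw [hfh] at hfp; exact hfp
            have hpwv : pw = get2 M 0 p := by rw [hfh] at hfv; exact hfv
            rw [← hpwv, ← hppc]
            exact hreach
          · exact ⟨h1, Or.inr (Or.inl ⟨f, hft, hfp, hfv⟩)⟩
        · exact ⟨h1, Or.inr (Or.inr h2)⟩
      obtain ⟨news', hst1, hlen, hnewsok, hMOKf, hOTf⟩ :=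
        A_fold hrect ho hreach hrest12 (fun f hf => hallok f (List.mem_cons_of_mem _ hf))
          (neighborsA map pc) [] M (fun nb h => (mem_neighborsA hrect hInRpc).mp h)
          (by simp) (by simpa using hMOKrest) (by simpa using hOT0)
      rw [List.append_nil] at hst1 hMOKf
      rw [hst1]
      apply ih n0 (rest ++ news') _ ?_ hMOKf hOTf ?_
      · -- QOK
        refine ⟨⟨r1, r2 ++ news', by rw [hr12, List.append_assoc], hr1, ?_⟩, ?_⟩
        · intro f hf
          rcases List.mem_append.mp hf with h | h
          · exact hr2 f h
          · exact (hnewsok f h).1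
        · intro f hf
          rcases List.mem_append.mp hf with h | h
          · exact hallok f (List.mem_cons_of_mem _ h)
          · exact (hnewsok f h).2.2
      · -- fuel bound
        have hlen4 : news'.length ≤ 4 := by
          have := length_neighborsA map pc
          simp at hlen
          omega
        have hterm' : ∀ y ∈ news'.map (fun e => 4 ^ (L + 2 - (e.2.2).toNat) - 1),
            y ≤ 4 ^ (L + 1 - n0) - 1 := by
          intro y hy
          obtain ⟨f, hf, rfl⟩ := List.mem_map.mp hy
          have htn : (f.2.2).toNat = n0 + 1 := by rw [(hnewsok f hf).1]; simp
          rw [htn, show L + 2 - (n0 + 1) = L + 1 - n0 by omega]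
        have hphin : phiQ L news' ≤ news'.length * (4 ^ (L + 1 - n0) - 1) := by
          unfold phiQ
          have := List.sum_le_card_nsmul _ _ hterm'
          simpa [smul_eq_mul] using this
        have hmul : news'.length * (4 ^ (L + 1 - n0) - 1) ≤ 4 * (4 ^ (L + 1 - n0) - 1) :=
          Nat.mul_le_mul_right _ hlen4
        have hphiq : phiQ L ((pc, pw, (n0 : Int)) :: rest) =
            (4 ^ (L + 2 - n0) - 1) + phiQ L rest := by
          rw [phiQ_cons]
          simp
        rw [hphiq] at hphi
        have hpow1 : 4 ^ (L + 2 - n0) = 4 * 4 ^ (L + 1 - n0) := by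
          rw [show L + 2 - n0 = (L + 1 - n0) + 1 by omega, pow_succ]
          ring
        have hpow2 : 1 ≤ 4 ^ (L + 1 - n0) := Nat.one_le_pow _ _ (by norm_num)
        rw [phiQ_append]
        omega

-- ---------- the B-side characterization ----------

def BInv (map : List (List Int)) (d : Nat) (best : List (List (Option Int))) : Prop :=
  Shape2 best (gridR map) (gridC map) ∧
  ∀ p, InR map p →
    ((get2 best none p = none ∧ ∀ w, ¬Reach0 map d p w) ∨
     (∃ w, get2 best none p = some w ∧ Reach0 map d p w ∧ ∀ w', Reach0 map d p w' → w ≤ w'))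

lemma BInv_zero {map : List (List Int)} (hrect : RectM map) :
    BInv map 0 (bSet (List.replicate (gridR map) (List.replicate (gridC map) none)) 0 0
      (some (wallB map 0 0))) := by
  have hR : 0 < gridR map := by
    unfold gridR; exact List.length_pos_iff.mpr hrect.1
  have h00 : InRn (gridR map) (gridC map) ((0 : Int), (0 : Int)) := by
    have := hrect.2.1
    refine ⟨le_refl _, ?_, le_refl _, ?_⟩ <;> simp <;> omega
  rw [bSet_eq]
  constructor
  · exact shape2_set2 (shape2_replicate _ _ _) h00
  · intro p hp
    by_cases hps : p = ((0 : Int), (0 : Int))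
    · subst hps
      right
      refine ⟨wallB map 0 0, ?_, ?_, ?_⟩
      · exact get2_set2_self _ (shape2_replicate _ _ _) h00
      · rw [wallB_eq]
        exact Reach0.base (by exact hp)
      · intro w' hw'
        rw [(reach_zero_inv hw').2, wallB_eq]
    · left
      constructor
      · rw [get2_set2_ne _ (shape2_replicate _ _ _) h00 (inr_iff_inrn.mp hp) hps]
        exact get2_replicate _ _ (inr_iff_inrn.mp hp)
      · intro w hw
        exact hps (reach_zero_inv hw).1

-- minimum-accumulator used to describe bRelax
def omin2 (o : Option Int) (w : Int) : Option Int :=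
  match o with
  | none => some w
  | some v => some (min v w)

def relaxF (nxt : List (List (Option Int))) (u : (Int × Int) × Int) : List (List (Option Int)) :=
  bRelax nxt u.1.1 u.1.2 u.2

def inB (R C : Nat) (nb : Int × Int) : Bool :=
  decide (0 ≤ nb.1 ∧ nb.1 < (R : Int) ∧ 0 ≤ nb.2 ∧ nb.2 < (C : Int))

def nb4 (r c : Nat) : List (Int × Int) :=
  [((r : Int) - 1, (c : Int)), ((r : Int) + 1, (c : Int)),
   ((r : Int), (c : Int) - 1), ((r : Int), (c : Int) + 1)]

def updSrc (map : List (List Int)) (R C : Nat) (best : List (List (Option Int)))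
    (r c : Nat) : List ((Int × Int) × Int) :=
  match bGet best (r : Int) (c : Int) with
  | none => []
  | some v => ((nb4 r c).filter (inB R C)).map (fun nb => (nb, v + wallB map nb.1 nb.2))

def updAll (map : List (List Int)) (R C : Nat) (best : List (List (Option Int))) :
    List ((Int × Int) × Int) :=
  (List.range R).flatMap (fun r => (List.range C).flatMap (fun c => updSrc map R C best r c))

lemma foldl_flatMap' {α β γ : Type} (L : List α) (g : α → List β) (f : γ → β → γ) (init : γ) :
    (L.flatMap g).foldl f init = L.foldl (fun a x => (g x).foldl f a) init := by
  induction L generalizing init with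
  | nil => rfl
  | cons a t ih => rw [List.flatMap_cons, List.foldl_append, List.foldl_cons, ih]

lemma bRelax_shape {best : List (List (Option Int))} {R C : Nat} {p : Int × Int} {w : Int}
    (h : Shape2 best R C) (hp : InRn R C p) : Shape2 (bRelax best p.1 p.2 w) R C := by
  unfold bRelax
  split
  · exact bSet_eq best p.1 p.2 _ ▸ shape2_set2 h hp
  · split
    · exact bSet_eq best p.1 p.2 _ ▸ shape2_set2 h hp
    · exact h

lemma bRelax_get {best : List (List (Option Int))} {R C : Nat} {p p' : Int × Int} {w : Int}
    (h : Shape2 best R C) (hp : InRn R C p) (hp' : InRn R C p') :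
    get2 (bRelax best p.1 p.2 w) none p' =
      if p' = p then omin2 (get2 best none p) w else get2 best none p' := by
  have hb : bGet best p.1 p.2 = get2 best none p := by rw [bGet_eq]
  unfold bRelax
  rw [hb]
  rcases hcase : get2 best none p with _ | v
  · simp only [hcase]
    by_cases he : p' = p
    · subst he
      rw [if_pos rfl, bSet_eq, get2_set2_self _ h hp]; rfl
    · rw [if_neg he, bSet_eq, get2_set2_ne _ h hp hp' he]
  · simp only [hcase]
    by_cases hlt : w < v
    · rw [if_pos hlt]
      by_cases he : p' = p
      · subst he
        rw [if_pos rfl, bSet_eq, get2_set2_self _ h hp]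
        show some w = some (min v w)
        rw [min_eq_right (le_of_lt hlt)]
      · rw [if_neg he, bSet_eq, get2_set2_ne _ h hp hp' he]
    · rw [if_neg hlt]
      by_cases he : p' = p
      · subst he
        rw [if_pos rfl, hcase]
        show some v = some (min v w)
        rw [min_eq_left (by omega)]
      · rw [if_neg he]

lemma relaxFold {R C : Nat} :
    ∀ (us : List ((Int × Int) × Int)) (acc : List (List (Option Int))),
      Shape2 acc R C → (∀ u ∈ us, InRn R C u.1) →
      Shape2 (us.foldl relaxF acc) R C ∧
      ∀ p, InRn R C p → get2 (us.foldl relaxF acc) none p =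
        (us.filterMap (fun u => if u.1 = p then some u.2 else none)).foldl omin2
          (get2 acc none p) := by
  intro us
  induction us with
  | nil => intro acc hsh _; exact ⟨hsh, fun p _ => rfl⟩
  | cons u t ih =>
    intro acc hsh hin
    have hu : InRn R C u.1 := hin u List.mem_cons_self
    have hsh' : Shape2 (relaxF acc u) R C := bRelax_shape hsh hu
    have iht := ih (relaxF acc u) hsh' (fun v hv => hin v (List.mem_cons_of_mem _ hv))
    refine ⟨iht.1, ?_⟩
    intro p hp
    rw [List.foldl_cons, iht.2 p hp]
    have hg : get2 (relaxF acc u) none p =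
        if p = u.1 then omin2 (get2 acc none u.1) u.2 else get2 acc none p :=
      bRelax_get hsh hu hp
    by_cases he : u.1 = p
    · rw [List.filterMap_cons_some (by rw [if_pos he]), List.foldl_cons, hg,
        if_pos he.symm, he]
    · rw [List.filterMap_cons_none (by rw [if_neg he]), hg, if_neg (fun hc => he hc.symm)]

lemma stepB_eq_fold (map : List (List Int)) (best : List (List (Option Int))) :
    stepB map (gridR map : Int) (gridC map : Int) best =
      (updAll map (gridR map) (gridC map) best).foldl relaxF
        (List.replicate (gridR map) (List.replicate (gridC map) none)) := by
  unfold stepB updAll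
  rw [foldl_flatMap']
  have h1 : ((gridR map : Int)).toNat = gridR map := by simp
  have h2 : ((gridC map : Int)).toNat = gridC map := by simp
  rw [h1, h2]
  apply List.foldl_ext
  intro nxt r _
  rw [foldl_flatMap']
  apply List.foldl_ext
  intro nxt' c _
  rcases hb : bGet best (r : Int) (c : Int) with _ | v
  · simp [updSrc, hb]
  · simp only [hb, updSrc]
    rw [List.foldl_map, List.foldl_filter]
    show (nb4 r c).foldl _ nxt' = _
    apply List.foldl_ext
    intro acc nb _
    simp [inB, relaxF]

lemma mem_updSrc {map : List (List Int)} {R C : Nat} {best} {r c : Nat} {p : Int × Int} {w : Int} :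
    (p, w) ∈ updSrc map R C best r c ↔
      ∃ v, bGet best (r : Int) (c : Int) = some v ∧ p ∈ nb4 r c ∧ InRn R C p ∧
        w = v + wallB map p.1 p.2 := by
  unfold updSrc
  rcases hb : bGet best (r : Int) (c : Int) with _ | v
  · simp
  · simp only [List.mem_map, List.mem_filter]
    constructor
    · rintro ⟨nb, ⟨hmem, hinb⟩, heq⟩
      obtain ⟨h1, h2⟩ := Prod.mk.injEq .. ▸ heq
      subst h1
      exact ⟨v, rfl, hmem, by simpa [inB, InRn] using hinb, h2.symm⟩
    · rintro ⟨v', hv', hmem, hin, hw⟩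
      obtain rfl : v = v' := by injection hv'
      exact ⟨p, ⟨hmem, by simpa [inB, InRn] using hin⟩, by rw [hw]⟩

lemma mem_nb4_iff_adj {map : List (List Int)} {r c : Nat} {p : Int × Int}
    (hr : r < gridR map) (hc : c < gridC map) :
    (p ∈ nb4 r c ∧ InRn (gridR map) (gridC map) p) ↔ AdjM map ((r : Int), (c : Int)) p := by
  have hsrc : InR map ((r : Int), (c : Int)) := by
    refine ⟨?_, ?_, ?_, ?_⟩ <;> simp <;> omega
  unfold nb4 AdjM
  simp only [List.mem_cons, List.mem_singleton, List.not_mem_nil, or_false, Prod.ext_iff]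
  constructor
  · rintro ⟨hmem, hin⟩
    refine ⟨hsrc, hin, ?_⟩
    rcases hmem with ⟨h1, h2⟩ | ⟨h1, h2⟩ | ⟨h1, h2⟩ | ⟨h1, h2⟩ <;> omega
  · rintro ⟨-, hin, hoff⟩
    refine ⟨?_, hin⟩
    rcases hoff with ⟨h1, h2 | h2⟩ | ⟨h1, h2 | h2⟩ <;> omega

lemma mem_updAll {map : List (List Int)} {best} {p : Int × Int} {w : Int}
    (hrect : RectM map) :
    ((p, w) ∈ updAll map (gridR map) (gridC map) best) ↔
      ∃ p', InR map p' ∧ AdjM map p' p ∧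
        bGet best p'.1 p'.2 = some (w - wallAt map p) ∧ True := by
  unfold updAll
  simp only [List.mem_flatMap, List.mem_range]
  constructor
  · rintro ⟨r, hr, c, hc, hmem⟩
    obtain ⟨v, hv, hmemnb, hin, hw⟩ := mem_updSrc.mp hmem
    have hadj := (mem_nb4_iff_adj (map := map) hr hc).mp ⟨hmemnb, hin⟩
    refine ⟨((r : Int), (c : Int)), hadj.1, hadj, ?_, trivial⟩
    rw [hv]
    congr 1
    rw [wallB_eq] at hw
    have : wallAt map (p.1, p.2) = wallAt map p := rfl
    omega
  · rintro ⟨p', hp', hadj, hb, -⟩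
    obtain ⟨q1, q2, q3, q4⟩ := hp'
    refine ⟨p'.1.toNat, by omega, p'.2.toNat, by omega, ?_⟩
    have hc1 : ((p'.1.toNat : Nat) : Int) = p'.1 := by omega
    have hc2 : ((p'.2.toNat : Nat) : Int) = p'.2 := by omega
    apply mem_updSrc.mpr
    refine ⟨w - wallAt map p, by rw [hc1, hc2]; exact hb, ?_, ?_, ?_⟩
    · have := (mem_nb4_iff_adj (map := map) (r := p'.1.toNat) (c := p'.2.toNat)
        (by omega) (by omega)).mpr (by rw [hc1, hc2]; exact hadj)
      exact this.1
    · exact inr_iff_inrn.mp hadj.2.1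
    · rw [wallB_eq]
      have : wallAt map (p.1, p.2) = wallAt map p := rfl
      omega

lemma omin_some : ∀ (l : List Int) (a : Int), ∃ w, l.foldl omin2 (some a) = some w ∧
    (w = a ∨ w ∈ l) ∧ w ≤ a ∧ ∀ y ∈ l, w ≤ y := by
  intro l
  induction l with
  | nil => exact fun a => ⟨a, rfl, Or.inl rfl, le_refl _, by simp⟩
  | cons b t ih =>
    intro a
    obtain ⟨w, hw, hmem, hle, hall⟩ := ih (min a b)
    refine ⟨w, hw, ?_, le_trans hle (min_le_left _ _), ?_⟩
    · rcases hmem with h | h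
      · rcases min_choice a b with h' | h'
        · exact Or.inl (h.trans h')
        · exact Or.inr (by rw [h.trans h']; exact List.mem_cons_self)
      · exact Or.inr (List.mem_cons_of_mem _ h)
    · intro y hy
      rcases List.mem_cons.mp hy with h | h
      · subst h; exact le_trans hle (min_le_right _ _)
      · exact hall y h

lemma omin_char : ∀ l : List Int, (l = [] ∧ l.foldl omin2 none = none) ∨
    (∃ w, l.foldl omin2 none = some w ∧ w ∈ l ∧ ∀ y ∈ l, w ≤ y) := by
  intro l
  cases l with
  | nil => exact Or.inl ⟨rfl, rfl⟩
  | cons b t =>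
    right
    obtain ⟨w, hw, hmem, hle, hall⟩ := omin_some t b
    refine ⟨w, hw, ?_, ?_⟩
    · rcases hmem with h | h
      · exact h ▸ List.mem_cons_self
      · exact List.mem_cons_of_mem _ h
    · intro y hy
      rcases List.mem_cons.mp hy with h | h
      · subst h; exact hle
      · exact hall y h

lemma BInv_step {map : List (List Int)} {d best} (hrect : RectM map)
    (h : BInv map d best) :
    BInv map (d + 1) (stepB map (gridR map : Int) (gridC map : Int) best) := by
  obtain ⟨hsh, hch⟩ := h
  have hupds : ∀ u ∈ updAll map (gridR map) (gridC map) best, InRn (gridR map) (gridC map) u.1 := by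
    rintro ⟨p, w⟩ hu
    obtain ⟨p', _, hadj, _, _⟩ := (mem_updAll hrect).mp hu
    exact inr_iff_inrn.mp hadj.2.1
  have hrf := relaxFold (R := gridR map) (C := gridC map)
    (updAll map (gridR map) (gridC map) best)
    (List.replicate (gridR map) (List.replicate (gridC map) none))
    (shape2_replicate _ _ _) hupds
  rw [stepB_eq_fold]
  refine ⟨hrf.1, ?_⟩
  intro p hp
  rw [hrf.2 p (inr_iff_inrn.mp hp), get2_replicate _ _ (inr_iff_inrn.mp hp)]
  set ups := (updAll map (gridR map) (gridC map) best).filterMap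
    (fun u => if u.1 = p then some u.2 else none) with hups
  have hmem : ∀ w : Int, w ∈ ups ↔ ∃ p', InR map p' ∧ AdjM map p' p ∧
      bGet best p'.1 p'.2 = some (w - wallAt map p) := by
    intro w
    rw [hups]
    simp only [List.mem_filterMap]
    constructor
    · rintro ⟨⟨pu, wu⟩, hu, hif⟩
      by_cases he : pu = p
      · subst he
        rw [if_pos rfl] at hif
        obtain rfl : wu = w := by injection hif
        obtain ⟨p', h1, h2, h3, -⟩ := (mem_updAll hrect).mp hu
        exact ⟨p', h1, h2, h3⟩
      · rw [if_neg he] at hif; exact absurd hif (by simp)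
    · rintro ⟨p', h1, h2, h3⟩
      exact ⟨(p, w), (mem_updAll hrect).mpr ⟨p', h1, h2, h3, trivial⟩, by rw [if_pos rfl]⟩
  -- relate candidates to Reach0 (d+1)
  have hcand : ∀ w : Int, w ∈ ups → Reach0 map (d + 1) p w := by
    intro w hw
    obtain ⟨p', h1, h2, h3⟩ := (hmem w).mp hw
    rcases hch p' h1 with ⟨hnone, -⟩ | ⟨vm, hsome, hreach, -⟩
    · rw [bGet_eq, hnone] at h3; exact absurd h3 (by simp)
    · rw [bGet_eq, hsome] at h3
      obtain hveq : vm = w - wallAt map p := by injection h3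
      have := Reach0.step hreach h2
      rwa [hveq, show w - wallAt map p + wallAt map p = w by ring] at this
  have hcand' : ∀ w' : Int, Reach0 map (d + 1) p w' → ∃ w ∈ ups, w ≤ w' := by
    intro w' hw'
    obtain ⟨p', v', hreach', hadj', hweq⟩ := reach_succ_inv hw'
    have hin' : InR map p' := reach_inr hreach'
    rcases hch p' hin' with ⟨hnone, hno⟩ | ⟨vm, hsome, hreachm, hminm⟩
    · exact absurd hreach' (hno v')
    · refine ⟨vm + wallAt map p, ?_, ?_⟩
      · apply (hmem _).mpr
        exact ⟨p', hin', hadj', by rw [bGet_eq, hsome]; congr 1; ring⟩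
      · have := hminm v' hreach'; omega
  rcases omin_char ups with ⟨hnil, hres⟩ | ⟨w, hres, hwmem, hwmin⟩
  · rw [hres]
    left
    refine ⟨rfl, ?_⟩
    intro w hw
    obtain ⟨w'', hw'', -⟩ := hcand' w hw
    rw [hnil] at hw''
    exact absurd hw'' (by simp)
  · rw [hres]
    right
    refine ⟨w, rfl, hcand w hwmem, ?_⟩
    intro w' hw'
    obtain ⟨w'', hw'', hle⟩ := hcand' w' hw'
    exact le_trans (hwmin w'' hw'') hle

lemma BInv_endtest {map : List (List Int)} {W : Int} {d best} (hrect : RectM map)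
    (h : BInv map d best) :
    (match bGet best ((gridR map : Int) - 1) ((gridC map : Int) - 1) with
      | some e => e ≤ W
      | none => False) ↔ Sdw map W d := by
  have hR : 0 < gridR map := by
    unfold gridR; exact List.length_pos_iff.mpr hrect.1
  have hend : InR map (endC map) := by
    have := hrect.2.1
    refine ⟨?_, ?_, ?_, ?_⟩ <;> unfold endC <;> simp <;> omega
  have hb : bGet best ((gridR map : Int) - 1) ((gridC map : Int) - 1) = get2 best none (endC map) := rfl
  rw [hb]
  rcases h.2 (endC map) hend with ⟨hnone, hno⟩ | ⟨w, hsome, hr, hmin⟩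
  · rw [hnone]
    simp only [Sdw]
    constructor
    · intro h'; exact h'.elim
    · rintro ⟨w, hw, -⟩; exact (hno w hw).elim
  · rw [hsome]
    simp only [Sdw]
    constructor
    · intro h'; exact ⟨w, hr, h'⟩
    · rintro ⟨w', hw', hle⟩; exact le_trans (hmin w' hw') hle

lemma altGo_none {map : List (List Int)} {W : Int} (hrect : RectM map) :
    ∀ (k : Nat) (d : Nat) best, BInv map d best → (∀ m, m < k → ¬Sdw map W (d + m)) →
      altGo map W (gridR map : Int) (gridC map : Int) k (d : Int) best = none := by
  intro k
  induction k with
  | zero => intro d best _ _; rfl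
  | succ k ih =>
    intro d best hinv hno
    have htest := BInv_endtest (W := W) hrect hinv
    have hnod : ¬Sdw map W d := by simpa using hno 0 (by omega)
    have hrec := ih (d + 1) _ (BInv_step hrect hinv)
      (fun m hm => by
        have := hno (m + 1) (by omega)
        simpa [Nat.add_comm, Nat.add_left_comm, Nat.add_assoc] using this)
    show altGo map W _ _ (k + 1) _ _ = none
    unfold altGo
    rcases hcase : bGet best ((gridR map : Int) - 1) ((gridC map : Int) - 1) with _ | e
    · simpa [hcase, Int.add_comm] using (by push_cast at hrec ⊢; exact hrec)
    · rw [hcase] at htest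
      have : ¬ e ≤ W := fun hle => hnod (htest.mp hle)
      simp only [this, if_false]
      simpa [hcase, Int.add_comm] using (by push_cast at hrec ⊢; exact hrec)

lemma altGo_some {map : List (List Int)} {W : Int} (hrect : RectM map) :
    ∀ (k : Nat) (d : Nat) best (m : Nat), BInv map d best → m < k → Sdw map W (d + m) →
      (∀ m', m' < m → ¬Sdw map W (d + m')) →
      altGo map W (gridR map : Int) (gridC map : Int) k (d : Int) best =
        some ((d : Int) + (m : Int) + 1) := by
  intro k
  induction k with
  | zero => intro d best m _ hm; omega
  | succ k ih =>
    intro d best m hinv hm hS hfirst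
    have htest := BInv_endtest (W := W) hrect hinv
    show altGo map W _ _ (k + 1) _ _ = _
    unfold altGo
    rcases hm0 : m with _ | m'
    · subst hm0
      have hSd : Sdw map W d := by simpa using hS
      rcases hcase : bGet best ((gridR map : Int) - 1) ((gridC map : Int) - 1) with _ | e
      · rw [hcase] at htest
        exact absurd (htest.mpr hSd) (by simp)
      · rw [hcase] at htest
        simp only [htest.mpr hSd, if_true]
        norm_num
    · subst hm0
      have hnod : ¬Sdw map W d := by simpa using hfirst 0 (by omega)
      have hrec := ih (d + 1) _ m' (BInv_step hrect hinv) (by omega)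
        (by rw [show d + 1 + m' = d + (m' + 1) by omega]; exact hS)
        (fun m'' hm'' => by
          rw [show d + 1 + m'' = d + (m'' + 1) by omega]
          exact hfirst (m'' + 1) (by omega))
      rcases hcase : bGet best ((gridR map : Int) - 1) ((gridC map : Int) - 1) with _ | e
      · rw [show ((d : Int) + (↑(m' + 1)) + 1) = (↑(d + 1) : Int) + ↑m' + 1 by push_cast; ring]
        simpa using hrec
      · rw [hcase] at htest
        have : ¬ e ≤ W := fun hle => hnod (htest.mp hle)
        simp only [this, if_false]
        rw [show ((d : Int) + (↑(m' + 1)) + 1) = (↑(d + 1) : Int) + ↑m' + 1 by push_cast; ring]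
        simpa using hrec

-- ---------- escape soundness ----------

lemma getD_range_map {α : Type} (f : Nat → α) (n i : Nat) (d : α) (h : i < n) :
    ((List.range n).map f).getD i d = f i := by
  rw [List.getD_eq_getElem?_getD, List.getElem?_map, List.getElem?_range h]; rfl

lemma escWall_eq (map : List (List Int)) (r c : Nat) :
    escWall map r c = wallAt map ((r : Int), (c : Int)) := by
  simp [escWall, wallAt]

-- value-iteration soundness invariant
def escOK (map : List (List Int)) (k : Nat) : Prop :=
  ∀ r c, r < gridR map → c < gridC map →
    ((escMat map (gridR map) (gridC map) k).getD r []).getD c (escINF (gridR map) (gridC map)) ≤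
        escINF (gridR map) (gridC map) ∧
      (((escMat map (gridR map) (gridC map) k).getD r []).getD c (escINF (gridR map) (gridC map)) =
          escINF (gridR map) (gridC map) ∨
        ∃ d ≤ k, Reach0 map d ((r : Int), (c : Int))
          (((escMat map (gridR map) (gridC map) k).getD r []).getD c
            (escINF (gridR map) (gridC map))))

lemma escINF_pos (R C : Nat) : 1 ≤ escINF R C := by
  unfold escINF; omega

lemma escOK_zero {map : List (List Int)} (hrect : RectM map) : escOK map 0 := by
  intro r c hr hc
  have hentry : ((escMat map (gridR map) (gridC map) 0).getD r []).getD c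
      (escINF (gridR map) (gridC map)) =
      (if r = 0 ∧ c = 0 then escWall map 0 0 else escINF (gridR map) (gridC map)) := by
    show (((List.range (gridR map)).map _).getD r []).getD c _ = _
    rw [getD_range_map _ _ _ _ hr, getD_range_map _ _ _ _ hc]
  rw [hentry]
  by_cases hs : r = 0 ∧ c = 0
  · obtain ⟨hr0, hc0⟩ := hs
    subst hr0; subst hc0
    have hw := wall_nonneg map ((0 : Int), (0 : Int))
    have h1 := escINF_pos (gridR map) (gridC map)
    have hwle : wallAt map ((0 : Int), (0 : Int)) ≤ 1 := by
      unfold wallAt; split <;> norm_num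
    rw [if_pos ⟨rfl, rfl⟩, escWall_eq]
    simp only [Nat.cast_zero]
    refine ⟨by omega, Or.inr ⟨0, le_refl _, ?_⟩⟩
    exact Reach0.base ⟨le_refl _, by simpa using hr, le_refl _, by simpa using hc⟩
  · rw [if_neg hs]
    exact ⟨le_refl _, Or.inl rfl⟩

lemma escOK_step {map : List (List Int)} (hrect : RectM map) {k : Nat} (hok : escOK map k) :
    escOK map (k + 1) := by
  intro r c hr hc
  have hrc : InR map ((r : Int), (c : Int)) := by
    refine ⟨?_, ?_, ?_, ?_⟩ <;> simp <;> omega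
  set R := gridR map
  set C := gridC map
  set m := escMat map R C k with hm
  have hentry : ((escMat map R C (k + 1)).getD r []).getD c (escINF R C) =
      min ((m.getD r []).getD c (escINF R C))
        (min (min (escGet R C m ((r : Int) - 1) (c : Int)) (escGet R C m ((r : Int) + 1) (c : Int)))
             (min (escGet R C m (r : Int) ((c : Int) - 1)) (escGet R C m (r : Int) ((c : Int) + 1)))
          + escWall map r c) := by
    show (((List.range R).map _).getD r []).getD c _ = _
    rw [getD_range_map _ _ _ _ hr, getD_range_map _ _ _ _ hc]
  have hold := hok r c hr hc
  -- generic fact about one neighbour lookup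
  have hnb : ∀ ri ci : Int,
      (((ci : Int) = (c : Int) ∧ ((r : Int) = ri + 1 ∨ (r : Int) = ri - 1)) ∨
       ((ri : Int) = (r : Int) ∧ ((c : Int) = ci + 1 ∨ (c : Int) = ci - 1))) →
      escINF R C ≤ escGet R C m ri ci ∨
        ∃ d ≤ k, Reach0 map d (ri, ci) (escGet R C m ri ci) ∧
          AdjM map (ri, ci) ((r : Int), (c : Int)) := by
    intro ri ci hoff
    unfold escGet
    split
    case isFalse => exact Or.inl (le_refl _)
    case isTrue hin =>
      obtain ⟨h1, h2, h3, h4⟩ := hin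
      have hri : ri.toNat < R := by omega
      have hci : ci.toNat < C := by omega
      have hcast1 : ((ri.toNat : Nat) : Int) = ri := by omega
      have hcast2 : ((ci.toNat : Nat) : Int) = ci := by omega
      rcases (hok ri.toNat ci.toNat hri hci).2 with hinf | ⟨d, hd, hreach⟩
      · rw [hinf]; exact Or.inl (le_refl _)
      · rw [hcast1, hcast2] at hreach
        refine Or.inr ⟨d, hd, hreach, ⟨reach_inr hreach, hrc, ?_⟩⟩
        simp only []
        rcases hoff with ⟨he, ho⟩ | ⟨he, ho⟩
        · exact Or.inr ⟨he.symm, ho⟩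
        · exact Or.inl ⟨he.symm, ho⟩
  rw [hentry]
  rcases min_choice ((m.getD r []).getD c (escINF R C))
      (min (min (escGet R C m ((r : Int) - 1) (c : Int)) (escGet R C m ((r : Int) + 1) (c : Int)))
           (min (escGet R C m (r : Int) ((c : Int) - 1)) (escGet R C m (r : Int) ((c : Int) + 1)))
        + escWall map r c) with hv | hv
  · rw [hv]
    rcases hold.2 with hinf | ⟨d, hd, hreach⟩
    · exact ⟨hold.1, Or.inl hinf⟩
    · exact ⟨hold.1, Or.inr ⟨d, by omega, hreach⟩⟩
  · rw [hv]
    have hvle : (min (min (escGet R C m ((r : Int) - 1) (c : Int)) (escGet R C m ((r : Int) + 1) (c : Int)))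
             (min (escGet R C m (r : Int) ((c : Int) - 1)) (escGet R C m (r : Int) ((c : Int) + 1)))
          + escWall map r c) ≤ (m.getD r []).getD c (escINF R C) := by
      rw [← hv]; exact min_le_left _ _
    have hle2 : (min (min (escGet R C m ((r : Int) - 1) (c : Int)) (escGet R C m ((r : Int) + 1) (c : Int)))
             (min (escGet R C m (r : Int) ((c : Int) - 1)) (escGet R C m (r : Int) ((c : Int) + 1)))
          + escWall map r c) ≤ escINF R C := le_trans hvle hold.1
    refine ⟨hle2, ?_⟩
    have hwall := wall_nonneg map ((r : Int), (c : Int))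
    rw [← escWall_eq] at hwall
    -- pick the attaining neighbour
    have : ∃ ri ci, ((ci = (c : Int) ∧ ((r : Int) = ri + 1 ∨ (r : Int) = ri - 1)) ∨
            (ri = (r : Int) ∧ ((c : Int) = ci + 1 ∨ (c : Int) = ci - 1))) ∧
        (min (min (escGet R C m ((r : Int) - 1) (c : Int)) (escGet R C m ((r : Int) + 1) (c : Int)))
             (min (escGet R C m (r : Int) ((c : Int) - 1)) (escGet R C m (r : Int) ((c : Int) + 1))))
          = escGet R C m ri ci := by
      rcases min_choice (min (escGet R C m ((r : Int) - 1) (c : Int)) (escGet R C m ((r : Int) + 1) (c : Int)))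
          (min (escGet R C m (r : Int) ((c : Int) - 1)) (escGet R C m (r : Int) ((c : Int) + 1))) with h' | h' <;>
        rw [h']
      · rcases min_choice (escGet R C m ((r : Int) - 1) (c : Int)) (escGet R C m ((r : Int) + 1) (c : Int)) with h'' | h'' <;> rw [h'']
        · exact ⟨(r : Int) - 1, (c : Int), Or.inl ⟨rfl, by omega⟩, rfl⟩
        · exact ⟨(r : Int) + 1, (c : Int), Or.inl ⟨rfl, by omega⟩, rfl⟩
      · rcases min_choice (escGet R C m (r : Int) ((c : Int) - 1)) (escGet R C m (r : Int) ((c : Int) + 1)) with h'' | h'' <;> rw [h'']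
        · exact ⟨(r : Int), (c : Int) - 1, Or.inr ⟨rfl, by omega⟩, rfl⟩
        · exact ⟨(r : Int), (c : Int) + 1, Or.inr ⟨rfl, by omega⟩, rfl⟩
    obtain ⟨ri, ci, hoff, hmin⟩ := this
    rw [hmin] at hle2 ⊢
    rcases hnb ri ci hoff with hinf | ⟨d, hd, hreach, hadj⟩
    · left; omega
    · right
      refine ⟨d + 1, by omega, ?_⟩
      rw [escWall_eq]
      exact Reach0.step hreach hadj

lemma escOK_all {map : List (List Int)} (hrect : RectM map) (k : Nat) : escOK map k := by
  induction k with
  | zero => exact escOK_zero hrect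
  | succ k ih => exact escOK_step hrect ih

lemma escape_sound {map : List (List Int)} {W : Int} (hrect : RectM map)
    (h : escapable map W) : ∃ d, d ≤ gridR map * gridC map - 1 ∧ Sdw map W d := by
  have hR : 0 < gridR map := by
    unfold gridR; exact List.length_pos_iff.mpr hrect.1
  have hC : 0 < gridC map := hrect.2.1
  have hRC : 0 < gridR map * gridC map := Nat.mul_pos hR hC
  obtain ⟨hle, hlt⟩ := h
  have hok := escOK_all hrect (gridR map * gridC map - 1) (gridR map - 1) (gridC map - 1)
    (by omega) (by omega)
  rcases hok.2 with hinf | ⟨d, hd, hreach⟩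
  · rw [show (map.length : Nat) = gridR map from rfl, show ((map.headD []).length : Nat) = gridC map from rfl] at hle hlt
    rw [hinf] at hlt
    exact absurd hlt (by unfold escINF; omega)
  · refine ⟨d, hd, ?_⟩
    rw [show (map.length : Nat) = gridR map from rfl, show ((map.headD []).length : Nat) = gridC map from rfl] at hle
    refine ⟨_, ?_, hle⟩
    have hcast : ((((gridR map - 1 : Nat)) : Int), (((gridC map - 1 : Nat)) : Int)) = endC map := by
      unfold endC
      exact Prod.ext (by simp; omega) (by simp; omega)
    rw [← hcast]
    exact hreach

-- ---------- assembling the ports ----------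

lemma lastRow_len {map : List (List Int)} (hrect : RectM map) :
    ((map.getD ((map.length : Int) - 1).toNat []).length : Int) = (gridC map : Int) := by
  have hR : 0 < map.length := List.length_pos_iff.mpr hrect.1
  have : ((map.length : Int) - 1).toNat = map.length - 1 := by omega
  rw [this]
  have h := (getD_row (rect_shape hrect) (i := map.length - 1) (by unfold gridR; omega)).2
  exact_mod_cast h

lemma bfs_eq_loop {map : List (List Int)} {W : Int} (hrect : RectM map) :
    bfs map W = bfsLoopA map W (gridR map : Int) (gridC map : Int)
      (4 ^ (gridR map * gridC map + 2)) [((0, 0), 0, 0)]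
      (List.replicate (gridR map) (List.replicate (gridC map) W)) := by
  have hR : 0 < map.length := List.length_pos_iff.mpr hrect.1
  show bfsLoopA map W (map.length : Int) _ _ _ _ = _
  rw [lastRow_len hrect]
  have h1 : ((map.length : Int)).toNat = gridR map := by simp [gridR]
  have h2 : ((gridC map : Int)).toNat = gridC map := by simp
  rw [h1, h2]
  rw [show ((map.length : Int)) = ((gridR map : Nat) : Int) from rfl]
  rfl

lemma bfs_alt_eq_go {map : List (List Int)} {W : Int} (hrect : RectM map) :
    bfs_alt map W = altGo map W (gridR map : Int) (gridC map : Int)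
      (gridR map * gridC map) 0
      (bSet (List.replicate (gridR map) (List.replicate (gridC map) none)) 0 0
        (some (wallB map 0 0))) := by
  have hR : 0 < map.length := List.length_pos_iff.mpr hrect.1
  show altGo map W (map.length : Int) _ _ _ _ = _
  rw [lastRow_len hrect]
  have h1 : ((map.length : Int)).toNat = gridR map := by simp [gridR]
  have h2 : ((gridC map : Int)).toNat = gridC map := by simp
  rw [h1, h2]
  rw [show ((map.length : Int)) = ((gridR map : Nat) : Int) from rfl]

lemma bfsLoopA_nil (map : List (List Int)) (W nr nc : Int) (f : Nat) (M : List (List Int)) :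
    bfsLoopA map W nr nc f [] M = none := by
  cases f <;> rfl

lemma neg_case {map : List (List Int)} {W : Int} (hrect : RectM map) (hW : W < 0) :
    bfs map W = none ∧ bfs_alt map W = none := by
  have hR : 0 < gridR map := by
    unfold gridR; exact List.length_pos_iff.mpr hrect.1
  have hC : 0 < gridC map := hrect.2.1
  have h00 : InR map ((0 : Int), (0 : Int)) := by
    refine ⟨le_refl _, ?_, le_refl _, ?_⟩ <;> simp <;> omega
  constructor
  · rw [bfs_eq_loop hrect]
    obtain ⟨f, hf⟩ : ∃ f, 4 ^ (gridR map * gridC map + 2) = f + 1 :=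
      ⟨4 ^ (gridR map * gridC map + 2) - 1, by
        have : 0 < 4 ^ (gridR map * gridC map + 2) := by positivity
        omega⟩
    rw [hf]
    show bfsLoopA map W _ _ (f + 1) (((0, 0), 0, 0) :: []) _ = none
    unfold bfsLoopA
    set cw : Int := if cellA map ((0 : Int), (0 : Int)).1 ((0 : Int), (0 : Int)).2 = 1
      then (0 : Int) + 1 else (0 : Int) with hcw
    have hcwpos : 0 ≤ cw := by rw [hcw]; split <;> omega
    rw [if_neg (fun h => by omega)]
    have hfold : ∀ ns : List (Int × Int), (∀ nb ∈ ns, InR map nb) →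
        ns.foldl (fun (acc : List ((Int × Int) × Int × Int) × List (List Int)) nb =>
          if cw ≤ mGetA acc.2 nb.1 nb.2 then
            (acc.1 ++ [(nb, cw, (0 : Int) + 1)], mSetA acc.2 nb.1 nb.2 cw)
          else acc)
          ([], List.replicate (gridR map) (List.replicate (gridC map) W)) =
        ([], List.replicate (gridR map) (List.replicate (gridC map) W)) := by
      intro ns
      induction ns with
      | nil => intro _; rfl
      | cons a t ih =>
        intro hm
        simp only [List.foldl_cons]
        rw [if_neg]
        · exact ih (fun nb h => hm nb (List.mem_cons_of_mem _ h))
        · rw [mGetA_eq, get2_replicate _ _ (inr_iff_inrn.mp (hm a List.mem_cons_self))]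
          omega
    rw [hfold _ (fun nb h => ((mem_neighborsA hrect h00).mp h).2.1)]
    exact bfsLoopA_nil ..
  · rw [bfs_alt_eq_go hrect]
    have := altGo_none (W := W) hrect (gridR map * gridC map) 0 _ (BInv_zero hrect)
      (fun m _ => by
        rintro ⟨w, hw, hle⟩
        exact absurd (reach_nonneg hw) (by omega))
    simpa using this

-- the positive case: both ports return (L+1) for the least solvable step count L
lemma pos_case {map : List (List Int)} {W : Int} (hrect : RectM map)
    (hesc : ∃ d, d ≤ gridR map * gridC map - 1 ∧ Sdw map W d) :
    bfs map W = bfs_alt map W := by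
  classical
  obtain ⟨d0, hd0, hS0⟩ := hesc
  have hex : ∃ d, Sdw map W d := ⟨d0, hS0⟩
  let L := Nat.find hex
  have hSL : Sdw map W L := Nat.find_spec hex
  have hLmin : ∀ d, Sdw map W d → L ≤ d := fun d hd => Nat.find_min' hex hd
  have hLle : L ≤ gridR map * gridC map - 1 := le_trans (hLmin d0 hS0) hd0
  have hRC : 0 < gridR map * gridC map := by
    have hR : 0 < gridR map := by
      unfold gridR; cases map with
      | nil => exact absurd rfl hrect.1
      | cons a l => simp
    exact Nat.mul_pos hR hrect.2.1
  -- the optimal path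
  obtain ⟨w0, hw0, hw0W⟩ := hSL
  obtain ⟨x, hx0, hadj, hxd, hu⟩ := reach_to_fun hw0
  have h0 : InR map (0, 0) := by
    have := reach_inr hw0
    constructor
    · norm_num
    refine ⟨?_, by norm_num, ?_⟩
    · exact_mod_cast by exact_mod_cast Nat.cast_pos.mpr (by
        have hR : 0 < gridR map := by
          unfold gridR; cases map with
          | nil => exact absurd rfl hrect.1
          | cons a l => simp
        exact hR)
    · exact_mod_cast Nat.cast_pos.mpr hrect.2.1
  have ho : OptPath map W x L := ⟨hx0, hadj, hxd, hu ▸ hw0W, hLmin⟩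
  -- A returns L+1
  have hA : bfs map W = some ((L : Int) + 1) := by
    rw [bfs_eq_loop hrect]
    refine A_main hrect ho _ 0 _ _ ?_ ?_ ?_ ?_
    · exact ⟨⟨[((0,0),0,0)], [], by simp, by simp, by simp⟩, by
        intro e he; simp at he; subst he
        exact ⟨0, rfl, by simpa [hx0] using
          (by simpa using Reach0.base (map := map) h0 : Reach0 map 0 (0,0) (wallAt map (0,0)))⟩⟩
    · refine ⟨shape2_replicate _ _ _, ?_⟩
      intro p hp
      rw [get2_replicate _ _ (inr_iff_inrn.mp hp)]
      exact ⟨le_refl _, Or.inl rfl⟩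
    · exact ⟨0, Nat.zero_le _, ((0,0),0,0), by simp, by simp [hx0], by
        simp [uWalls, List.range_succ, hx0], rfl⟩
    · -- phi bound
      have : phiQ L [((0,0),0,0)] = 4 ^ (L + 2) - 1 := by simp [phiQ]
      rw [this]
      calc 4 ^ (L + 2) - 1 ≤ 4 ^ (L + 2) := Nat.sub_le _ _
        _ ≤ 4 ^ (gridR map * gridC map + 2) := Nat.pow_le_pow_right (by norm_num) (by omega)
  -- B returns L+1
  have hB : bfs_alt map W = some ((L : Int) + 1) := by
    rw [bfs_alt_eq_go hrect]
    have := altGo_some (W := W) hrect (k := gridR map * gridC map) (d := 0)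
      (best := bSet (List.replicate (gridR map) (List.replicate (gridC map) none)) 0 0
        (some (wallB map 0 0))) (m := L) (BInv_zero hrect) (by omega)
      (by simpa using (⟨w0, hw0, hw0W⟩ : Sdw map W L)) (by intro m' hm'; simpa using Nat.find_min hex hm')
    simpa using this
  rw [hA, hB]

-- ===== VERDICT (by name: the statement is the Claim_ definition above) =====
theorem bfs_spec : Claim_equal_bfs := by
  intro map num_walls _hdom hpre
  unfold Spec_bfs
  obtain ⟨hne, hC, hrows, hcase⟩ := hpre
  have hrect : RectM map := ⟨hne, hC, hrows⟩
  rcases hcase with hneg | hesc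
  · have := neg_case hrect hneg
    rw [this.1, this.2]
  · exact pos_case hrect (escape_sound hrect hesc)
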